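-- pv_equiv track=rewrite | github.com/lig96/Baekjoon | 백준/Silver/8586. Zapałki/Zapałki.py | sol_prefixsum
-- ===== SOURCE A (Python) =====
-- def sol_prefixsum(numbers, N):
--     ret = float('inf')
--     right_becomes_0 = numbers.count(1)
--     left_becomes_1 = 0
--
--     ret = min(ret, left_becomes_1+right_becomes_0)
--
--     for i in range(N):
--         if numbers[i] == 1:
--             right_becomes_0 -= 1
--         elif numbers[i] == 0:
--             left_becomes_1 += 1
--
--         ret = min(ret, left_becomes_1+right_becomes_0)
--     return ret
-- ===== SOURCE B (Python) =====
-- def _seg(lst):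
--     # Divide and conquer: returns (ones, zeros, best) for a segment, where best
--     # is the minimum over all split points of zeros-on-the-left + ones-on-the-right.
--     # Combine rule: the optimal split of l+r lies either in l (pay all ones of r)
--     # or in r (pay all zeros of l).
--     if not lst:
--         return (0, 0, 0)
--     if len(lst) == 1:
--         x = lst[0]
--         o = 1 if x == 1 else 0
--         z = 1 if x == 0 else 0
--         return (o, z, min(o, z))
--     mid = len(lst) // 2
--     o1, z1, m1 = _seg(lst[:mid])
--     o2, z2, m2 = _seg(lst[mid:])
--     return (o1 + o2, z1 + z2, min(m1 + o2, z1 + m2))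
--
--
-- def sol_prefixsum(numbers, N):
--     n = max(N, 0)
--     prefix, rest = numbers[:n], numbers[n:]
--     o, z, m = _seg(prefix)
--     return m + rest.count(1)
-- ===== Notes on version B (the rewrite author's own statement) =====
-- stated objective: alternative
-- what changed: Replaces A's single left-to-right sweep (two counters and a running min over split points) by a divide-and-conquer on the first N elements with a monoid combine (ones, zeros, best-split), adding the ones beyond index N afterwards.
import Mathlib
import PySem

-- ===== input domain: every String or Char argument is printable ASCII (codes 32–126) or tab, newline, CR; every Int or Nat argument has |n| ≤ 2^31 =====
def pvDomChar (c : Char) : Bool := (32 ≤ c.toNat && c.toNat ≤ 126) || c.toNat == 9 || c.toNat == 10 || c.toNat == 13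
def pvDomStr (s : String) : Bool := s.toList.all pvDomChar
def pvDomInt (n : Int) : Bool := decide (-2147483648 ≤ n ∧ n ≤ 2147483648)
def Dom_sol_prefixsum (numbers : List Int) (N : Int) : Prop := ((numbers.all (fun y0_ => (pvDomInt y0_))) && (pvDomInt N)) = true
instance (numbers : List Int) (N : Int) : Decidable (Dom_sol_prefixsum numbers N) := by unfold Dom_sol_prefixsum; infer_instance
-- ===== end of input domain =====

-- B replaces A's left-to-right sweep (two counters + running min) by a
-- divide-and-conquer on the first N elements with a (ones, zeros, best-split)
-- monoid combine, adding the ones beyond index N afterwards (alternative algorithm).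

-- ===== PORT A =====
def sol_prefixsum (numbers : List Int) (N : Int) : Int :=
  let right0 : Int := PySem.List.count numbers 1   -- numbers.count(1)
  -- ret = min(float('inf'), 0 + right0) = 0 + right0
  let s := (PySem.List.pyRange 0 N 1).foldl
    (fun (s : Int × Int × Int) (i : Int) =>
      let v := PySem.List.pyGetD numbers i 2      -- numbers[i]; in range under Pre_, default unreachable
      let r := if v = 1 then s.1 - 1 else s.1
      let l := if v = 1 then s.2.1 else if v = 0 then s.2.1 + 1 else s.2.1
      (r, l, min s.2.2 (l + r)))
    (right0, 0, 0 + right0)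
  s.2.2

-- ===== PORT B =====
-- _seg: divide and conquer; lst[:mid] / lst[mid:] with the natural midpoint are
-- exactly List.take / List.drop (PySem.List.slice_to_natCast / slice_from_natCast).
def pvSeg : List Int → Int × Int × Int
  | [] => (0, 0, 0)
  | [x] =>
    ((if x = 1 then 1 else 0), (if x = 0 then 1 else 0),
      min (if x = 1 then (1:Int) else 0) (if x = 0 then 1 else 0))
  | x :: y :: t =>
    let l := x :: y :: t
    let m := l.length / 2
    let s1 := pvSeg (l.take m)
    let s2 := pvSeg (l.drop m)
    (s1.1 + s2.1, s1.2.1 + s2.2.1, min (s1.2.2 + s2.1) (s1.2.1 + s2.2.2))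
termination_by l => l.length
decreasing_by
  · simp [List.length_take]; omega
  · simp; omega

def sol_prefixsum_alt (numbers : List Int) (N : Int) : Int :=
  let n : Int := max N 0
  let pfx := PySem.List.slice numbers none (some n)     -- numbers[:n] (prefix)
  let rest := PySem.List.slice numbers (some n) none     -- numbers[n:]
  let s := pvSeg pfx
  s.2.2 + (PySem.List.count rest 1 : Int)                -- rest.count(1)

-- ===== PRECONDITION & SPEC =====
-- Pre_ excludes N > len(numbers), on which A raises IndexError.
def Pre_sol_prefixsum (numbers : List Int) (N : Int) : Prop := N ≤ (numbers.length : Int)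
instance (numbers : List Int) (N : Int) : Decidable (Pre_sol_prefixsum numbers N) := by unfold Pre_sol_prefixsum; infer_instance
def pvWitness_sol_prefixsum : List Int × Int := ([1, 0, 1], 2)

def Spec_sol_prefixsum (numbers : List Int) (N : Int) (out : Int) : Prop := out = sol_prefixsum_alt numbers N
instance (numbers : List Int) (N : Int) (out : Int) : Decidable (Spec_sol_prefixsum numbers N out) := by unfold Spec_sol_prefixsum; infer_instance

-- ===== CLAIM (what is proved, stated in full; the proofs are below) =====
def Claim_equal_sol_prefixsum : Prop := ∀ (numbers : List Int) (N : Int), Dom_sol_prefixsum numbers N → Pre_sol_prefixsum numbers N → Spec_sol_prefixsum numbers N (sol_prefixsum numbers N)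

-- ===== LEMMAS AND PROOFS =====

-- pvF l = minimum over prefixes p of l of (count 0 p - count 1 p); the common spec
def pvF : List Int → Int
  | [] => 0
  | x :: t => min 0 ((if x = 0 then 1 else 0) - (if x = 1 then 1 else 0) + pvF t)

lemma pvF_nonpos (l : List Int) : pvF l ≤ 0 := by
  cases l with
  | nil => simp [pvF]
  | cons x t => simp [pvF]

lemma pvF_append (l₁ l₂ : List Int) :
    pvF (l₁ ++ l₂) = min (pvF l₁) ((l₁.count 0 : Int) - (l₁.count 1 : Int) + pvF l₂) := by
  induction l₁ with
  | nil => have := pvF_nonpos l₂; simp [pvF]; omega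
  | cons x t ih =>
    simp only [List.cons_append, pvF, ih, List.count_cons]
    by_cases h1 : x = 1 <;> by_cases h0 : x = 0 <;>
      simp [h1, h0] <;> omega

lemma pvSeg_eq (l : List Int) :
    pvSeg l = ((l.count 1 : Int), (l.count 0 : Int), (l.count 1 : Int) + pvF l) := by
  induction l using pvSeg.induct with
  | case1 => simp [pvSeg, pvF]
  | case2 x =>
    by_cases h1 : x = 1 <;> by_cases h0 : x = 0 <;>
      simp [pvSeg, pvF, h1, h0]
  | case3 x y t l m ih1 ih2 =>
    have hm : m = (x :: y :: t).length / 2 := rfl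
    have hl : l = x :: y :: t := rfl
    rw [pvSeg, ih1, ih2, hm, hl]
    generalize (x :: y :: t).length / 2 = k
    conv_rhs => rw [← List.take_append_drop k (x :: y :: t)]
    rw [pvF_append]
    simp only [List.count_append, Prod.mk.injEq]
    push_cast
    exact ⟨by omega, by omega, by omega⟩

lemma pv_invA (l : List Int) (r lf ret : Int) (h : ret ≤ lf + r) :
    (l.foldl (fun (s : Int × Int × Int) (v : Int) =>
        (if v = 1 then s.1 - 1 else s.1,
         if v = 1 then s.2.1 else if v = 0 then s.2.1 + 1 else s.2.1,
         min s.2.2 ((if v = 1 then s.2.1 else if v = 0 then s.2.1 + 1 else s.2.1) +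
           if v = 1 then s.1 - 1 else s.1))) (r, lf, ret)).2.2
      = min ret (lf + r + pvF l) := by
  induction l generalizing r lf ret with
  | nil => simp [pvF]; omega
  | cons v t ih =>
    simp only [List.foldl_cons]
    have hF := pvF_nonpos t
    by_cases h1 : v = 1
    · subst h1
      simp only [pvF]
      norm_num
      rw [ih _ _ _ (by omega)]
      omega
    · by_cases h0 : v = 0
      · subst h0
        simp only [pvF, if_neg h1]
        norm_num
        rw [ih _ _ _ (by omega)]
        omega
      · simp only [if_neg h1, if_neg h0, pvF]
        rw [ih _ _ _ (by omega)]
        omega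

-- A's index loop over range(N) is the value loop over the first N elements
lemma pv_aTake (numbers : List Int) (N : Int) (hN : 0 ≤ N) (hlen : N ≤ (numbers.length : Int))
    (f : (Int × Int × Int) → Int → (Int × Int × Int)) (init : Int × Int × Int) :
    (PySem.List.pyRange 0 N 1).foldl (fun s i => f s (PySem.List.pyGetD numbers i 2)) init
      = (numbers.take N.toNat).foldl f init := by
  have hlt : (numbers.take N.toNat).length = N.toNat := by
    simp [List.length_take]; omega
  have hcast : ((numbers.take N.toNat).length : Int) = N := by
    rw [hlt]; omega
  have h := PySem.List.foldl_pyRange_zero_pyGetD (numbers.take N.toNat) 2 f init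
  rw [PySem.List.len_eq, hcast] at h
  rw [← h]
  apply PySem.List.foldl_congr_mem
  intro acc i hi
  rw [PySem.List.mem_pyRange_one] at hi
  have h1 : i < ((numbers.take N.toNat).length : Int) := by omega
  have h2 : i < (numbers.length : Int) := by omega
  rw [PySem.List.pyGetD_eq_getElem numbers 2 hi.1 h2,
      PySem.List.pyGetD_eq_getElem (numbers.take N.toNat) 2 hi.1 h1, List.getElem_take]

-- ===== VERDICT (by name: the statement is the Claim_ definition above) =====
theorem sol_prefixsum_spec : Claim_equal_sol_prefixsum := by
  intro numbers N _ hpre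
  unfold Spec_sol_prefixsum
  simp only [sol_prefixsum, sol_prefixsum_alt]
  unfold Pre_sol_prefixsum at hpre
  by_cases hN : 0 ≤ N
  · have hmax : max N 0 = N := by omega
    rw [hmax, PySem.List.slice_to numbers hN, PySem.List.slice_from numbers hN]
    have hA := pv_aTake numbers N hN hpre
      (fun (s : Int × Int × Int) (v : Int) =>
        (if v = 1 then s.1 - 1 else s.1,
         if v = 1 then s.2.1 else if v = 0 then s.2.1 + 1 else s.2.1,
         min s.2.2 ((if v = 1 then s.2.1 else if v = 0 then s.2.1 + 1 else s.2.1) +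
           if v = 1 then s.1 - 1 else s.1)))
      (((PySem.List.count numbers 1 : Nat) : Int), 0, 0 + ((PySem.List.count numbers 1 : Nat) : Int))
    beta_reduce at hA
    rw [hA, pv_invA _ _ _ _ (by omega), pvSeg_eq]
    simp only [PySem.List.count_eq]
    have hsplit : numbers = numbers.take N.toNat ++ numbers.drop N.toNat :=
      (List.take_append_drop _ _).symm
    have hcnt : (numbers.count 1 : Int)
        = ((numbers.take N.toNat).count 1 : Int) + ((numbers.drop N.toNat).count 1 : Int) := by
      conv_lhs => rw [hsplit]
      push_cast [List.count_append]
      ring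
    have hF := pvF_nonpos (numbers.take N.toNat)
    omega
  · have hmax : max N 0 = 0 := by omega
    rw [hmax, PySem.List.pyRange_one_eq_nil (by omega),
      PySem.List.slice_to numbers (by omega : (0:Int) ≤ 0),
      PySem.List.slice_from numbers (by omega : (0:Int) ≤ 0)]
    simp [pvSeg, PySem.List.count_eq]
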